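-- pv_equiv track=rewrite | github.com/mchang21/Advent_Of_Code | 2023/Day_13/13.py | check_reflection
-- ===== SOURCE A (Python) =====
-- def check_reflection(matrix):
--     for i in range(len(matrix)-1):
--         l, r = i, i+1
--         # check for matching rows
--         while l >= 0 and r < len(matrix) and matrix[l] == matrix[r]:
--             l -= 1
--             r += 1
--         # if we get to the end, we found a line of reflection between i and i+1
--         if l < 0 or r >= len(matrix):
--             return i+1
--     return 0
-- ===== SOURCE B (Python) =====
-- def check_reflection(matrix):
--     n = len(matrix)
--     for i in range(1, n):
--         k = min(i, n - i)
--         if matrix[i - 1] == matrix[i] and matrix[i - k:i][::-1] == matrix[i:i + k]: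
--             return i
--     return 0
-- ===== Notes on version B (the rewrite author's own statement) =====
-- stated objective: idiomatic
-- what changed: B replaces A's per-axis two-pointer expansion while-loop with an adjacent-pair guard followed by a reversed-prefix-slice vs suffix-slice comparison at each candidate axis.
import Mathlib
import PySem

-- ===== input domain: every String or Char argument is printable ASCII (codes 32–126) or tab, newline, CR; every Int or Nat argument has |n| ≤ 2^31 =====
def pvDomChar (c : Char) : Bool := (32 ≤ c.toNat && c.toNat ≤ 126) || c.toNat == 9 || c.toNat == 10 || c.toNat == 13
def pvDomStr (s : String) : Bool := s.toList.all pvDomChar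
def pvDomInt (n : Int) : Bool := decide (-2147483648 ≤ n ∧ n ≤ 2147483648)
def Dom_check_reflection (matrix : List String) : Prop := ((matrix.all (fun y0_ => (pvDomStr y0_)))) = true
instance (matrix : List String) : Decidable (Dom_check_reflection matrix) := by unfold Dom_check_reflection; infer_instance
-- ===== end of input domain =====

-- B replaces A's per-axis two-pointer expansion while-loop with a reversed-prefix-slice vs suffix-slice comparison at each candidate axis (objective: idiomatic; same asymptotic cost).

-- ===== PORT A =====
-- the inner 'while l >= 0 and r < len(matrix) and matrix[l] == matrix[r]' loop
def goA (m : List String) (l r : Int) : Int × Int :=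
  if h : 0 ≤ l ∧ r < (m.length : Int) ∧ PySem.List.pyGet? m l = PySem.List.pyGet? m r then
    goA m (l - 1) (r + 1)
  else (l, r)
termination_by (l + 1).toNat
decreasing_by omega

-- 'for i in range(len(matrix)-1)'
def loopA (m : List String) (i : Nat) : Int :=
  if i < m.length - 1 then
    let p := goA m (i : Int) ((i : Int) + 1)
    if p.1 < 0 ∨ (m.length : Int) ≤ p.2 then (i : Int) + 1
    else loopA m (i + 1)
  else 0
termination_by m.length - 1 - i
decreasing_by omega

def check_reflection (matrix : List String) : Int := loopA matrix 0

-- ===== PORT B =====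
-- 'for i in range(1, n): k = min(i, n-i); if matrix[i-1] == matrix[i] and matrix[i-k:i][::-1] == matrix[i:i+k]: return i'
def loopB (m : List String) (i : Nat) : Int :=
  if i < m.length then
    let k := min i (m.length - i)
    if PySem.List.pyGet? m ((i : Int) - 1) = PySem.List.pyGet? m (i : Int) ∧
       (PySem.List.slice m (some ((i : Int) - (k : Int))) (some (i : Int))).reverse
        = PySem.List.slice m (some (i : Int)) (some ((i : Int) + (k : Int))) then (i : Int)
    else loopB m (i + 1)
  else 0
termination_by m.length - i
decreasing_by omega

def check_reflection_alt (matrix : List String) : Int := loopB matrix 1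

-- ===== PRECONDITION & SPEC =====
def Spec_check_reflection (matrix : List String) (out : Int) : Prop := out = check_reflection_alt matrix
instance (matrix : List String) (out : Int) : Decidable (Spec_check_reflection matrix out) := by unfold Spec_check_reflection; infer_instance

-- ===== CLAIM (what is proved, stated in full; the proofs are below) =====
def Claim_equal_check_reflection : Prop := ∀ (matrix : List String), Dom_check_reflection matrix → Spec_check_reflection matrix (check_reflection matrix)

-- ===== LEMMAS AND PROOFS =====

theorem goA_spec (m : List String) (l r : Int) :
    ((goA m l r).1 < 0 ∨ (m.length : Int) ≤ (goA m l r).2) ↔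
    (∀ t : Nat, 0 ≤ l - t → r + t < (m.length : Int) →
      PySem.List.pyGet? m (l - t) = PySem.List.pyGet? m (r + t)) := by
  by_cases h : 0 ≤ l ∧ r < (m.length : Int) ∧ PySem.List.pyGet? m l = PySem.List.pyGet? m r
  · rw [goA, dif_pos h]
    rw [goA_spec m (l-1) (r+1)]
    constructor
    · intro H t h1 h2
      match t with
      | 0 => simpa using h.2.2
      | Nat.succ t =>
        have := H t (by push_cast at h1 ⊢; omega) (by push_cast at h2 ⊢; omega)
        have e1 : l - 1 - (t:Int) = l - ((t:Nat)+1 : Nat) := by push_cast; ring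
        have e2 : r + 1 + (t:Int) = r + ((t:Nat)+1 : Nat) := by push_cast; ring
        rw [e1, e2] at this
        exact this
    · intro H t h1 h2
      have := H (t+1) (by push_cast at h1 ⊢; omega) (by push_cast at h2 ⊢; omega)
      have e1 : l - ((t:Nat)+1 : Nat) = l - 1 - (t:Int) := by push_cast; ring
      have e2 : r + ((t:Nat)+1 : Nat) = r + 1 + (t:Int) := by push_cast; ring
      rw [e1, e2] at this
      exact this
  · rw [goA, dif_neg h]
    push Not at h
    by_cases hl : l < 0
    · simp only []
      constructor
      · intro _ t h1 h2; exfalso; omega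
      · intro _; left; exact hl
    · by_cases hr : (m.length : Int) ≤ r
      · constructor
        · intro _ t h1 h2; exfalso; omega
        · intro _; right; exact hr
      · have hne := h (by omega) (by omega)
        constructor
        · intro H; exfalso; rcases H with H | H <;> simp at H <;> omega
        · intro H
          exfalso
          have := H 0 (by omega) (by omega)
          simp at this
          exact hne this
termination_by (l + 1).toNat
decreasing_by have := h.1; omega

theorem sliceB_spec (m : List String) (p : Nat) (hp : 0 < p) (hpn : p < m.length) :
    ((PySem.List.slice m (some ((p : Int) - ((min p (m.length - p) : Nat) : Int))) (some (p : Int))).reverse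
      = PySem.List.slice m (some (p : Int)) (some ((p : Int) + ((min p (m.length - p) : Nat) : Int)))) ↔
    (∀ j : Nat, j < min p (m.length - p) → m[p - 1 - j]? = m[p + j]?) := by
  set n := m.length with hn
  set k := min p (n - p) with hk
  have hkp : k ≤ p := by omega
  have hknp : k ≤ n - p := by omega
  have e1 : (p : Int) - (k : Int) = ((p - k : Nat) : Int) := by omega
  have e2 : (p : Int) + (k : Int) = ((p + k : Nat) : Int) := by push_cast; ring
  rw [e1, e2, PySem.List.slice_natCast, PySem.List.slice_natCast]
  have e3 : p - (p - k) = k := by omega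
  have e4 : p + k - p = k := by omega
  rw [e3, e4]
  have lL : ((m.drop (p - k)).take k).length = k := by
    simp [List.length_take, List.length_drop]; omega
  have lR : ((m.drop p).take k).length = k := by
    simp [List.length_take, List.length_drop]; omega
  constructor
  · intro H j hj
    have hj1 : p - 1 - j < n := by omega
    have hj2 : p + j < n := by omega
    have := congrArg (fun xs => xs[j]?) H
    simp only [List.getElem?_reverse (by omega : j < ((m.drop (p-k)).take k).length ), lL] at this
    rw [List.getElem?_take, List.getElem?_take, List.getElem?_drop, List.getElem?_drop] at this
    have a1 : p - k + (k - 1 - j) = p - 1 - j := by omega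
    have a2 : p + j = p + j := rfl
    simp only [a1] at this
    simpa [hj, show k - 1 - j < k by omega] using this
  · intro H
    apply List.ext_getElem (by simp only [List.length_reverse, lL, lR])
    intro j hjl hjr
    have hj : j < k := by omega
    have hj1 : p - 1 - j < n := by omega
    have hj2 : p + j < n := by omega
    have := H j hj
    rw [List.getElem_reverse]
    simp only [lL] at *
    rw [List.getElem_take, List.getElem_drop, List.getElem_take, List.getElem_drop]
    have a1 : p - k + (k - 1 - j) = p - 1 - j := by omega
    simp only [a1]
    rw [List.getElem?_eq_getElem hj1, List.getElem?_eq_getElem hj2] at this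
    exact Option.some.inj this

theorem bridge (m : List String) (i : Nat) (hi : i + 1 < m.length) :
    ((goA m (i : Int) ((i : Int) + 1)).1 < 0 ∨ (m.length : Int) ≤ (goA m (i : Int) ((i : Int) + 1)).2) ↔
    (PySem.List.pyGet? m (((i+1 : Nat) : Int) - 1) = PySem.List.pyGet? m ((i+1 : Nat) : Int) ∧
     (PySem.List.slice m (some (((i+1 : Nat) : Int) - ((min (i+1) (m.length - (i+1)) : Nat) : Int))) (some ((i+1 : Nat) : Int))).reverse
      = PySem.List.slice m (some ((i+1 : Nat) : Int)) (some (((i+1 : Nat) : Int) + ((min (i+1) (m.length - (i+1)) : Nat) : Int)))) := by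
  rw [goA_spec]
  have hslice := sliceB_spec m (i+1) (by omega) hi
  have hguard : (∀ j : Nat, j < min (i+1) (m.length - (i+1)) → m[(i+1) - 1 - j]? = m[(i+1) + j]?) →
      PySem.List.pyGet? m (((i+1 : Nat) : Int) - 1) = PySem.List.pyGet? m ((i+1 : Nat) : Int) := by
    intro H
    have h0 := H 0 (by omega)
    have e1 : ((i+1 : Nat) : Int) - 1 = ((i : Nat) : Int) := by push_cast; ring
    have e2 : i + 1 - 1 - 0 = i := by omega
    rw [e1, PySem.List.pyGet?_natCast, PySem.List.pyGet?_natCast]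
    rw [e2] at h0
    simpa using h0
  rw [show (PySem.List.pyGet? m (((i+1 : Nat) : Int) - 1) = PySem.List.pyGet? m ((i+1 : Nat) : Int) ∧
     (PySem.List.slice m (some (((i+1 : Nat) : Int) - ((min (i+1) (m.length - (i+1)) : Nat) : Int))) (some ((i+1 : Nat) : Int))).reverse
      = PySem.List.slice m (some ((i+1 : Nat) : Int)) (some (((i+1 : Nat) : Int) + ((min (i+1) (m.length - (i+1)) : Nat) : Int)))) ↔
     (∀ j : Nat, j < min (i+1) (m.length - (i+1)) → m[(i+1) - 1 - j]? = m[(i+1) + j]?)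
    from ⟨fun h => hslice.mp h.2, fun h => ⟨hguard h, hslice.mpr h⟩⟩]
  set n := m.length with hn
  set k := min (i+1) (n - (i+1)) with hk
  constructor
  · intro H j hj
    have h1 : 0 ≤ (i : Int) - j := by omega
    have h2 : (i : Int) + 1 + j < (n : Int) := by omega
    have := H j h1 h2
    have e1 : (i : Int) - j = ((i - j : Nat) : Int) := by omega
    have e2 : (i : Int) + 1 + j = ((i + 1 + j : Nat) : Int) := by push_cast; ring
    rw [e1, e2, PySem.List.pyGet?_natCast, PySem.List.pyGet?_natCast] at this
    have a1 : i + 1 - 1 - j = i - j := by omega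
    have a2 : i + 1 + j = i + 1 + j := rfl
    rw [a1]
    exact this
  · intro H t h1 h2
    have ht : t < k := by omega
    have := H t ht
    have a1 : i + 1 - 1 - t = i - t := by omega
    rw [a1] at this
    have e1 : (i : Int) - t = ((i - t : Nat) : Int) := by omega
    have e2 : (i : Int) + 1 + t = ((i + 1 + t : Nat) : Int) := by push_cast; ring
    rw [e1, e2, PySem.List.pyGet?_natCast, PySem.List.pyGet?_natCast]
    exact this

theorem loop_eq (m : List String) (i : Nat) : loopA m i = loopB m (i + 1) := by
  rw [loopA, loopB]
  by_cases hi : i < m.length - 1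
  · have hi' : i + 1 < m.length := by omega
    rw [if_pos hi, if_pos hi']
    have hb := bridge m i hi'
    by_cases hc : ((goA m (i : Int) ((i : Int) + 1)).1 < 0 ∨ (m.length : Int) ≤ (goA m (i : Int) ((i : Int) + 1)).2)
    · rw [if_pos hc, if_pos (hb.mp hc)]
      push_cast; ring
    · rw [if_neg hc, if_neg (fun hx => hc (hb.mpr hx))]
      exact loop_eq m (i + 1)
  · rw [if_neg hi, if_neg (by omega)]
termination_by m.length - 1 - i

-- ===== VERDICT (by name: the statement is the Claim_ definition above) =====
theorem check_reflection_spec : Claim_equal_check_reflection := by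
  intro matrix _
  unfold Spec_check_reflection check_reflection check_reflection_alt
  exact loop_eq matrix 0
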